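-- pv_equiv track=rewrite | github.com/guillermocomesanacimadevila/Rosalind-Bioinformatics-Stronghold- | Overlap Graphs/overlap graphs.py | overlap_graphs
-- ===== SOURCE A (Python) =====
-- def overlap_graphs(sequences, k=3):
--     overlaps = []
--     for id1, seq1 in sequences.items():
--         suffix = seq1[-k:]
--         for id2, seq2 in sequences.items():
--             if id1 != id2:
--                 prefix = seq2[:k]
--                 if suffix == prefix:
--                     overlaps.append((id1, id2))
--
--     return overlaps
-- ===== SOURCE B (Python) =====
-- def overlap_graphs(sequences, k=3):
--     index = {}
--     for id2, seq2 in sequences.items():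
--         index.setdefault(seq2[:k], []).append(id2)
--     overlaps = []
--     for id1, seq1 in sequences.items():
--         for id2 in index.get(seq1[-k:], []):
--             if id2 != id1:
--                 overlaps.append((id1, id2))
--     return overlaps
-- ===== Notes on version B (the rewrite author's own statement) =====
-- stated objective: faster
-- what changed: Replaces A's nested all-pairs scan with a single-pass dict indexing k-prefixes to id lists, so each suffix is looked up once; insertion order of the index preserves A's output order.
import Mathlib
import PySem

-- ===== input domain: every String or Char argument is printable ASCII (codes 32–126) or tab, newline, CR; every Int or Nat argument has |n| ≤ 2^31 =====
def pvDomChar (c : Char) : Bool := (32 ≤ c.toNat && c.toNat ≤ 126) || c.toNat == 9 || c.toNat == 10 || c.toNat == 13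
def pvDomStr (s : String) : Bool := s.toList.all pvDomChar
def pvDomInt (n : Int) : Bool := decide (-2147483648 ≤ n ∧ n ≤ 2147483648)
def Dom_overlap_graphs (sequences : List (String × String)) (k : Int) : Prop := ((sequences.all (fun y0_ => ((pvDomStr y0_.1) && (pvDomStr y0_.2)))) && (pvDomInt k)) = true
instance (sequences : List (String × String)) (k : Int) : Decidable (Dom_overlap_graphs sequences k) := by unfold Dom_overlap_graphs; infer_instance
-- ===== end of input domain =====

-- B replaces A's quadratic all-pairs scan by a one-pass prefix index (dict: k-prefix → ids),
-- looking each suffix up once; same output, same order.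

-- ===== PORT A =====
def overlap_graphs (sequences : List (String × String)) (k : Int) : List (String × String) :=
  sequences.foldl (fun overlaps p =>
    let suffix := PySem.Str.slice p.2 (some (-k)) none        -- seq1[-k:]
    sequences.foldl (fun ov q =>
      if p.1 ≠ q.1 then
        if PySem.Str.slice q.2 none (some k) = suffix then    -- seq2[:k] == suffix
          ov ++ [(p.1, q.1)]
        else ov
      else ov) overlaps) []

-- ===== PORT B =====
def overlap_graphs_alt (sequences : List (String × String)) (k : Int) : List (String × String) :=
  -- index.setdefault(seq2[:k], []).append(id2)
  let index : PySem.Dict String (List String) :=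
    sequences.foldl
      (fun d q => d.modify (PySem.Str.slice q.2 none (some k)) [] (fun l => l ++ [q.1]))
      PySem.Dict.empty
  sequences.foldl (fun overlaps p =>
    (index.getD (PySem.Str.slice p.2 (some (-k)) none) []).foldl
      (fun ov id2 => if id2 ≠ p.1 then ov ++ [(p.1, id2)] else ov) overlaps) []

-- ===== PRECONDITION & SPEC =====
def Spec_overlap_graphs (sequences : List (String × String)) (k : Int) (out : List (String × String)) : Prop := out = overlap_graphs_alt sequences k
instance (sequences : List (String × String)) (k : Int) (out : List (String × String)) : Decidable (Spec_overlap_graphs sequences k out) := by unfold Spec_overlap_graphs; infer_instance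

-- ===== CLAIM (what is proved, stated in full; the proofs are below) =====
def Claim_equal_overlap_graphs : Prop := ∀ (sequences : List (String × String)) (k : Int), Dom_overlap_graphs sequences k → Spec_overlap_graphs sequences k (overlap_graphs sequences k)

-- ===== LEMMAS AND PROOFS =====

-- the k-prefix of an entry
def pvPref (k : Int) (q : String × String) : String := PySem.Str.slice q.2 none (some k)

-- B's index, characterised: looking up s returns (in order) the ids whose prefix is s
theorem pv_index_getD (k : Int) (L : List (String × String)) (d : PySem.Dict String (List String)) (s : String) :
    (L.foldl (fun d q => d.modify (pvPref k q) [] (fun l => l ++ [q.1])) d).getD s []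
      = d.getD s [] ++ (L.filter (fun q => pvPref k q = s)).map Prod.fst := by
  induction L generalizing d with
  | nil => simp
  | cons q L ih =>
    simp only [List.foldl_cons, ih, PySem.Dict.getD_modify, List.filter_cons]
    by_cases h : pvPref k q = s
    · simp [h]
    · simp [h, Ne.symm h]

-- A's inner loop as a filter
theorem pv_innerA (k : Int) (p : String × String) (L : List (String × String)) (acc : List (String × String)) :
    (L.foldl (fun ov q =>
      if p.1 ≠ q.1 then
        if PySem.Str.slice q.2 none (some k) = PySem.Str.slice p.2 (some (-k)) none then
          ov ++ [(p.1, q.1)]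
        else ov
      else ov) acc)
    = acc ++ (L.filter (fun q =>
        decide (p.1 ≠ q.1) && decide (pvPref k q = PySem.Str.slice p.2 (some (-k)) none))).map
        (fun q => (p.1, q.1)) := by
  have := PySem.List.foldl_append_if
    (fun q : String × String =>
      decide (p.1 ≠ q.1) && decide (pvPref k q = PySem.Str.slice p.2 (some (-k)) none))
    (fun q => (p.1, q.1)) L acc
  rw [← this]
  apply PySem.List.foldl_congr_mem
  intro ov q _
  by_cases h1 : p.1 ≠ q.1 <;> by_cases h2 : pvPref k q = PySem.Str.slice p.2 (some (-k)) none <;>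
    simp [h1, pvPref]

-- B's inner loop as a filter
theorem pv_innerB (p1 : String) (ids : List String) (acc : List (String × String)) :
    (ids.foldl (fun ov id2 => if id2 ≠ p1 then ov ++ [(p1, id2)] else ov) acc)
    = acc ++ (ids.filter (fun id2 => decide (id2 ≠ p1))).map (fun id2 => (p1, id2)) := by
  have := PySem.List.foldl_append_if (fun id2 : String => decide (id2 ≠ p1))
    (fun id2 => (p1, id2)) ids acc
  rw [← this]
  apply PySem.List.foldl_congr_mem
  intro ov id2 _
  by_cases h : id2 ≠ p1 <;> simp [h]

-- the per-entry contributions agree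
theorem pv_step_eq (sequences : List (String × String)) (k : Int) (p : String × String) :
    (sequences.filter (fun q =>
        decide (p.1 ≠ q.1) && decide (pvPref k q = PySem.Str.slice p.2 (some (-k)) none))).map
        (fun q => (p.1, q.1))
    = (((sequences.filter (fun q => decide (pvPref k q = PySem.Str.slice p.2 (some (-k)) none))).map
          Prod.fst).filter (fun id2 => decide (id2 ≠ p.1))).map (fun id2 => (p.1, id2)) := by
  rw [List.filter_map, List.map_map, List.filter_filter]
  apply congrArg
  apply List.filter_congr
  intro q _
  simp [Function.comp, ne_comm]

-- generic: a fold whose step appends a per-element block is the concatenation of the blocks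
theorem pv_foldl_flatMap {α β : Type} (f : List β → α → List β) (g : α → List β)
    (L : List α) (init : List β) (h : ∀ acc x, x ∈ L → f acc x = acc ++ g x) :
    L.foldl f init = init ++ L.flatMap g :=
  (PySem.List.foldl_congr_mem L f (fun acc x => acc ++ g x) init h).trans
    (PySem.List.foldl_append_eq_flatMap g L init)

theorem overlap_graphs_spec : Claim_equal_overlap_graphs := by
  intro sequences k _
  unfold Spec_overlap_graphs overlap_graphs overlap_graphs_alt
  dsimp only
  have e1 := pv_foldl_flatMap
    (fun overlaps p =>
      sequences.foldl (fun ov q =>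
        if p.1 ≠ q.1 then
          if PySem.Str.slice q.2 none (some k) = PySem.Str.slice p.2 (some (-k)) none then
            ov ++ [(p.1, q.1)]
          else ov
        else ov) overlaps)
    (fun p => (sequences.filter (fun q =>
        decide (p.1 ≠ q.1) && decide (pvPref k q = PySem.Str.slice p.2 (some (-k)) none))).map
        (fun q => (p.1, q.1)))
    sequences []
    (fun acc p _ => pv_innerA k p sequences acc)
  have e2 := pv_foldl_flatMap
    (fun overlaps p =>
      ((sequences.foldl
          (fun d q => d.modify (PySem.Str.slice q.2 none (some k)) [] (fun l => l ++ [q.1]))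
          PySem.Dict.empty).getD (PySem.Str.slice p.2 (some (-k)) none) []).foldl
        (fun ov id2 => if id2 ≠ p.1 then ov ++ [(p.1, id2)] else ov) overlaps)
    (fun p => (((sequences.filter (fun q =>
          decide (pvPref k q = PySem.Str.slice p.2 (some (-k)) none))).map Prod.fst).filter
          (fun id2 => decide (id2 ≠ p.1))).map (fun id2 => (p.1, id2)))
    sequences []
    (by
      intro acc p _
      dsimp only
      rw [pv_innerB]
      have hidx := pv_index_getD k sequences PySem.Dict.empty
        (PySem.Str.slice p.2 (some (-k)) none)
      simp only [pvPref] at hidx ⊢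
      rw [hidx]
      simp)
  rw [e1, e2]
  apply congrArg
  apply List.flatMap_congr
  intro p _
  exact pv_step_eq sequences k p
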